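-- pv_equiv track=rewrite | github.com/rf-iasys/OEIS | OEIS_A189642_4.py | rebuild_A189642
-- ===== SOURCE A (Python) =====
-- from math import gcd
--
-- def cubic(a: int) -> int:
--     """Cubic polynomial."""
--     return 2*a**3 + 3*a**2 - a - 1
--
-- def rebuild_A189642(n_terms: int):
--     """
--     Rebuild A189642 using the cubic and gcd factor.
--     a starts at 2 so that index alignment matches OEIS.
--     """
--     seq = []
--
--     for a in range(2, n_terms + 2):
--         P = cubic(a)
--         g = gcd(a + 5, 9)
--         value = P // g
--         seq.append(value)
--
--     return seq
-- ===== SOURCE B (Python) =====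
-- from math import gcd
--
-- def rebuild_A189642(n_terms):
--     """
--     Rebuild A189642 by the method of finite differences: the cubic
--     2a^3+3a^2-a-1 has constant third difference 12, so each value is
--     obtained from the previous one by updating running differences
--     instead of re-evaluating the polynomial.
--     Seeds at a=2: f=25, d1=f(3)-f(2)=52, d2=f(4)-2f(3)+f(2)=42.
--     """
--     seq = []
--     f, d1, d2, a = 25, 52, 42, 2
--     for _ in range(n_terms):
--         seq.append(f // gcd(a + 5, 9))
--         f += d1
--         d1 += d2
--         d2 += 12
--         a += 1
--     return seq
-- ===== Notes on version B (the rewrite author's own statement) =====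
-- stated objective: faster
-- what changed: B generates the cubic's values by finite differences (running first/second differences, constant third difference 12, three additions per term) carried across iterations instead of re-evaluating 2a^3+3a^2-a-1 with exponentiation at each a.
import Mathlib
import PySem

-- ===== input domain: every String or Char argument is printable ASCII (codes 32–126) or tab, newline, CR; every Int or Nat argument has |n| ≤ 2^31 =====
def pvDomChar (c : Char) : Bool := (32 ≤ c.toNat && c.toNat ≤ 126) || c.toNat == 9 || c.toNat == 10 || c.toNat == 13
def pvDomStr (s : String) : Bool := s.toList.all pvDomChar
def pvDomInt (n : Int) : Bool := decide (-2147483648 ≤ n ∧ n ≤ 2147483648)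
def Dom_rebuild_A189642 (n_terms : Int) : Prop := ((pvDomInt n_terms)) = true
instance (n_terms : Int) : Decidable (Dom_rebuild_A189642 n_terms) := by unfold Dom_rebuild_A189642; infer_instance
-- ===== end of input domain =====

-- B rebuilds the sequence by finite differences (running d1, d2, constant third difference 12)
-- instead of re-evaluating the cubic at each index; objective: a different algorithm (constant-factor speedup measured).

-- ===== PORT A =====
def cubic (a : Int) : Int := 2*a^3 + 3*a^2 - a - 1

def rebuild_A189642 (n_terms : Int) : List Int :=
  (PySem.List.pyRange 2 (n_terms + 2) 1).foldl
    (fun seq a =>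
      let P := cubic a
      let g : Int := Int.gcd (a + 5) 9
      let value := PySem.Int.floordiv P g
      seq ++ [value]) []

-- ===== PORT B =====
-- one iteration of B's loop body: append f // gcd(a+5, 9), then update the running differences
def stepB (st : List Int × Int × Int × Int × Int) (_ : Int) : List Int × Int × Int × Int × Int :=
  let (seq, f, d1, d2, a) := st
  (seq ++ [PySem.Int.floordiv f (Int.gcd (a + 5) 9)], f + d1, d1 + d2, d2 + 12, a + 1)

def rebuild_A189642_alt (n_terms : Int) : List Int :=
  ((PySem.List.pyRange 0 n_terms 1).foldl stepB ([], 25, 52, 42, 2)).1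

-- ===== PRECONDITION & SPEC =====
def Spec_rebuild_A189642 (n_terms : Int) (out : List Int) : Prop := out = rebuild_A189642_alt n_terms
instance (n_terms : Int) (out : List Int) : Decidable (Spec_rebuild_A189642 n_terms out) := by unfold Spec_rebuild_A189642; infer_instance

-- ===== CLAIM (what is proved, stated in full; the proofs are below) =====
def Claim_equal_rebuild_A189642 : Prop := ∀ (n_terms : Int), Dom_rebuild_A189642 n_terms → Spec_rebuild_A189642 n_terms (rebuild_A189642 n_terms)

-- ===== LEMMAS AND PROOFS =====

-- the a-th term of the sequence
def pvTerm (a : Int) : Int := PySem.Int.floordiv (cubic a) (Int.gcd (a + 5) 9)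

-- common spine: k consecutive terms starting at a
def pvSpine : Nat → Int → List Int
  | 0, _ => []
  | k+1, a => pvTerm a :: pvSpine k (a + 1)

lemma pvA_inv : ∀ (k : Nat) (a : Int) (acc : List Int),
    (PySem.List.pyRange a (a + k) 1).foldl
      (fun seq x => seq ++ [PySem.Int.floordiv (cubic x) (Int.gcd (x + 5) 9)]) acc
      = acc ++ pvSpine k a := by
  intro k
  induction k with
  | zero => intro a acc; rw [PySem.List.pyRange_one_eq_nil (by simp : a + ((0:Nat):Int) ≤ a)]; simp [pvSpine]
  | succ k ih =>
    intro a acc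
    rw [PySem.List.pyRange_one_cons (by push_cast; omega : a < a + ((k+1 : Nat) : Int))]
    simp only [List.foldl_cons]
    have h2 : a + ((k+1 : Nat) : Int) = (a + 1) + (k : Int) := by push_cast; ring
    rw [h2, ih (a + 1)]
    simp [pvSpine, pvTerm]


def pvD1 (a : Int) : Int := cubic (a+1) - cubic a
def pvD2 (a : Int) : Int := cubic (a+2) - 2 * cubic (a+1) + cubic a

lemma pvB_inv : ∀ (l : List Int) (seq : List Int) (a : Int),
    (l.foldl stepB (seq, cubic a, pvD1 a, pvD2 a, a)).1 = seq ++ pvSpine l.length a := by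
  intro l
  induction l with
  | nil => intro seq a; simp [pvSpine]
  | cons x xs ih =>
    intro seq a
    have hf : cubic a + pvD1 a = cubic (a + 1) := by simp only [pvD1, cubic]; ring
    have hd1 : pvD1 a + pvD2 a = pvD1 (a + 1) := by simp only [pvD1, pvD2, cubic]; ring
    have hd2 : pvD2 a + 12 = pvD2 (a + 1) := by simp only [pvD2, cubic]; ring
    have hstep : stepB (seq, cubic a, pvD1 a, pvD2 a, a) x
        = (seq ++ [pvTerm a], cubic (a+1), pvD1 (a+1), pvD2 (a+1), a+1) := by
      simp [stepB, pvTerm, hf, hd1, hd2]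
    rw [List.foldl_cons, hstep, ih]
    simp [pvSpine]

lemma pvA_eq (n : Int) : rebuild_A189642 n = pvSpine n.toNat 2 := by
  unfold rebuild_A189642
  by_cases h : n ≤ 0
  · rw [PySem.List.pyRange_one_eq_nil (by omega)]
    have : n.toNat = 0 := by omega
    simp [this, pvSpine]
  · push_neg at h
    have h2 : n + 2 = (2 : Int) + (n.toNat : Nat) := by omega
    rw [h2, pvA_inv]
    simp

lemma pvB_eq (n : Int) : rebuild_A189642_alt n = pvSpine n.toNat 2 := by
  unfold rebuild_A189642_alt
  have h25 : (25 : Int) = cubic 2 := by decide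
  have h52 : (52 : Int) = pvD1 2 := by decide
  have h42 : (42 : Int) = pvD2 2 := by decide
  rw [h25, h52, h42, pvB_inv]
  simp [PySem.List.length_pyRange_one]

-- ===== VERDICT (by name: the statement is the Claim_ definition above) =====
theorem rebuild_A189642_spec : Claim_equal_rebuild_A189642 := by
  intro n _
  unfold Spec_rebuild_A189642
  rw [pvA_eq, pvB_eq]
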